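-- pv_equiv track=rewrite | github.com/heart-of-me/KASP- | KASP引物设计_web.py | check_repeat_region
-- ===== SOURCE A (Python) =====
-- def check_repeat_region(seq: str, max_repeat: int = 4) -> bool:
--     """检查是否有连续重复碱基"""
--     seq = seq.upper()
--     for base in ['A', 'T', 'G', 'C']:
--         if base * max_repeat in seq:
--             return True
--     # 检查二核苷酸重复
--     for i in range(len(seq) - 5):
--         dinuc = seq[i:i+2]
--         if dinuc * 3 in seq:
--             return True
--     return False
-- ===== SOURCE B (Python) =====
-- def check_repeat_region(seq: str, max_repeat: int = 4) -> bool: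
--     """检查是否有连续重复碱基 — single linear pass: longest A/T/G/C run + period-2 6-windows."""
--     s = seq.upper()
--     n = len(s)
--     best = 0
--     run = 0
--     prev = ''
--     for ch in s:
--         if ch in 'ATGC':
--             run = run + 1 if ch == prev else 1
--             if run > best:
--                 best = run
--         else:
--             run = 0
--         prev = ch
--     if best >= max_repeat:
--         return True
--     for j in range(n - 5):
--         if s[j] == s[j + 2] == s[j + 4] and s[j + 1] == s[j + 3] == s[j + 5]:
--             return True
--     return False
-- ===== Notes on version B (the rewrite author's own statement) =====
-- stated objective: alternative
-- what changed: A rescans the whole sequence with a substring search for every candidate repeat (four base*max_repeat searches plus one dinucleotide*3 search per position, quadratic in the worst case); B makes one linear pass tracking the longest A/T/G/C run and then checks each six-character window for period-2 periodicity, with no substring searches at all; on typical early-hit inputs A's early exit can still be quicker.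
import Mathlib
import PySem

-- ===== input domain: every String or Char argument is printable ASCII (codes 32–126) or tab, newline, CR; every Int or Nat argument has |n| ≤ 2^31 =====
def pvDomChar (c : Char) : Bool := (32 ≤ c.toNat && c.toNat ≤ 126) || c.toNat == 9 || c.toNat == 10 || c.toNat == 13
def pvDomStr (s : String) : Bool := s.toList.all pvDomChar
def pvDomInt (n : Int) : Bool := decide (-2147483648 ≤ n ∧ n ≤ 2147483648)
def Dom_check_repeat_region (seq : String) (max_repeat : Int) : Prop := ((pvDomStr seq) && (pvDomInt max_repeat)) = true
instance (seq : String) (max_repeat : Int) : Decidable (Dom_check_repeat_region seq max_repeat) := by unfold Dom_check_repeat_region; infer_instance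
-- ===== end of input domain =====

-- B replaces A's repeated whole-sequence substring scans by one linear pass (longest A/T/G/C run threshold + period-2 six-char windows); same return value on every input.

-- ===== PORT A =====
-- literal port of A: try each base's max_repeat-fold repeat as a substring of s, then for each i
-- try (s[i:i+2])*3 as a substring of the whole s
def check_repeat_region (seq : String) (max_repeat : Int) : Bool :=
  let s := PySem.Chars.upper seq.toList
  if (['A', 'T', 'G', 'C']).any (fun base =>
      PySem.Chars.isIn (PySem.List.pyRepeat [base] max_repeat) s) then
    true
  else
    (PySem.List.pyRange 0 ((s.length : Int) - 5) 1).any (fun i =>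
      let dinuc := PySem.List.slice s (some i) (some (i + 2))
      PySem.Chars.isIn (PySem.List.pyRepeat dinuc 3) s)

-- ===== PORT B =====
-- loop body of B's single pass: state (best, run, prev); `ch in 'ATGC'` is the four-char membership test
def pvStepB (st : Int × Int × Option Char) (ch : Char) : Int × Int × Option Char :=
  if ch ∈ ['A', 'T', 'G', 'C'] then
    let run := if some ch = st.2.2 then st.2.1 + 1 else 1
    (if run > st.1 then run else st.1, run, some ch)
  else
    (st.1, 0, some ch)

def check_repeat_region_alt (seq : String) (max_repeat : Int) : Bool :=
  let s := PySem.Chars.upper seq.toList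
  let n := s.length
  let st := s.foldl pvStepB (0, 0, none)
  if st.1 ≥ max_repeat then
    true
  else
    (List.range (n - 5)).any (fun j =>
      (s.getD j ' ' == s.getD (j + 2) ' ' && s.getD (j + 2) ' ' == s.getD (j + 4) ' ') &&
      (s.getD (j + 1) ' ' == s.getD (j + 3) ' ' && s.getD (j + 3) ' ' == s.getD (j + 5) ' '))

-- ===== PRECONDITION & SPEC =====
def Spec_check_repeat_region (seq : String) (max_repeat : Int) (out : Bool) : Prop := out = check_repeat_region_alt seq max_repeat
instance (seq : String) (max_repeat : Int) (out : Bool) : Decidable (Spec_check_repeat_region seq max_repeat out) := by unfold Spec_check_repeat_region; infer_instance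

-- ===== CLAIM (what is proved, stated in full; the proofs are below) =====
def Claim_equal_check_repeat_region : Prop := ∀ (seq : String) (max_repeat : Int), Dom_check_repeat_region seq max_repeat → Spec_check_repeat_region seq max_repeat (check_repeat_region seq max_repeat)

-- ===== LEMMAS AND PROOFS =====

-- the maximum value taken by B's `run` counter while scanning s, starting from counter r and previous char p
def pvG : Int → Option Char → List Char → Int
  | _, _, [] => 0
  | r, p, c :: t =>
    if c ∈ ['A', 'T', 'G', 'C'] then
      let r' := if some c = p then r + 1 else 1
      max r' (pvG r' (some c) t)
    else
      max 0 (pvG 0 (some c) t)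

theorem pvG_nonneg (s : List Char) (r : Int) (p : Option Char) : 0 ≤ pvG r p s := by
  induction s generalizing r p with
  | nil => simp [pvG]
  | cons c t ih =>
    by_cases h : c ∈ ['A', 'T', 'G', 'C'] <;>
      simp only [pvG, h, if_pos, le_max_iff] <;> simp [ih]

theorem pvFold_fst (s : List Char) : ∀ (b r : Int) (p : Option Char), 0 ≤ b →
    (s.foldl pvStepB (b, r, p)).1 = max b (pvG r p s) := by
  induction s with
  | nil => intro b r p hb; simp [pvG]; omega
  | cons c t ih =>
    intro b r p hb
    by_cases h : c ∈ ['A', 'T', 'G', 'C']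
    · have hstep : pvStepB (b, r, p) c =
        (max b (if some c = p then r + 1 else 1), (if some c = p then r + 1 else 1), some c) := by
        simp [pvStepB, h]; omega
      rw [List.foldl_cons, hstep, ih _ _ _ (by omega)]
      simp only [pvG, h, if_true]
      omega
    · have hstep : pvStepB (b, r, p) c = (b, 0, some c) := by simp [pvStepB, h]
      rw [List.foldl_cons, hstep, ih _ _ _ hb]
      simp only [pvG, h, if_false]
      have := pvG_nonneg t 0 (some c)
      omega

theorem pvG_mono (s : List Char) : ∀ (r1 r2 : Int) (p1 p2 : Option Char), 0 ≤ r1 → r1 ≤ r2 →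
    (p1 = p2 ∨ r1 = 0) → pvG r1 p1 s ≤ pvG r2 p2 s := by
  induction s with
  | nil => intro _ _ _ _ _ _ _; simp [pvG]
  | cons c t ih =>
    intro r1 r2 p1 p2 h0 h12 hp
    by_cases h : c ∈ ['A', 'T', 'G', 'C']
    · simp only [pvG, h, if_true]
      have hr : (if some c = p1 then r1 + 1 else 1) ≤ (if some c = p2 then r2 + 1 else 1) := by
        rcases hp with rfl | rfl <;> split_ifs <;> omega
      have h0' : 0 ≤ (if some c = p1 then r1 + 1 else 1) := by split_ifs <;> omega
      have := ih (if some c = p1 then r1 + 1 else 1) (if some c = p2 then r2 + 1 else 1)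
        (some c) (some c) h0' hr (Or.inl rfl)
      omega
    · simp only [pvG, h, if_false]
      have := ih 0 0 (some c) (some c) le_rfl le_rfl (Or.inl rfl)
      omega

theorem pvG_append_le (pre rest : List Char) : ∀ (r : Int) (p : Option Char), 0 ≤ r →
    pvG 0 none rest ≤ pvG r p (pre ++ rest) := by
  induction pre with
  | nil =>
    intro r p hr
    exact pvG_mono rest 0 r none p le_rfl hr (Or.inr rfl)
  | cons c pre ih =>
    intro r p hr
    by_cases h : c ∈ ['A', 'T', 'G', 'C']
    · simp only [List.cons_append, pvG, h, if_true]
      have h0' : 0 ≤ (if some c = p then r + 1 else 1) := by split_ifs <;> omega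
      have := ih (if some c = p then r + 1 else 1) (some c) h0'
      omega
    · simp only [List.cons_append, pvG, h, if_false]
      have := ih 0 (some c) le_rfl
      omega

theorem pvG_replicate (b : Char) (hb : b ∈ ['A', 'T', 'G', 'C']) (k : Nat) :
    ∀ (r : Int) (t : List Char), r + k ≤ max r (pvG r (some b) (List.replicate k b ++ t)) := by
  induction k with
  | zero => intro r t; simp
  | succ k ih =>
    intro r t
    have hrw : List.replicate (k + 1) b ++ t = b :: (List.replicate k b ++ t) := by
      simp [List.replicate_succ]
    rw [hrw]
    simp only [pvG, hb, if_true]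
    have := ih (r + 1) t
    push_cast
    omega

-- a run of k repeated bases b somewhere in s forces B's best counter to reach k
theorem pvClaimA (s : List Char) (b : Char) (hb : b ∈ ['A', 'T', 'G', 'C']) (k : Nat)
    (hk : 1 ≤ k) (h : List.replicate k b <:+: s) : (k : Int) ≤ pvG 0 none s := by
  rcases h with ⟨u, v, huv⟩
  have h1 : pvG 0 none (List.replicate k b ++ v) ≤ pvG 0 none s := by
    rw [← huv, List.append_assoc]
    exact pvG_append_le u _ 0 none le_rfl
  have h2 : (k : Int) ≤ pvG 0 none (List.replicate k b ++ v) := by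
    obtain ⟨k', rfl⟩ : ∃ k', k = k' + 1 := ⟨k - 1, by omega⟩
    have hrw : List.replicate (k' + 1) b ++ v = b :: (List.replicate k' b ++ v) := by
      simp [List.replicate_succ]
    rw [hrw]
    simp only [pvG, hb, if_true]
    rw [if_neg (by simp)]
    have := pvG_replicate b hb k' 1 v
    push_cast
    omega
  omega

-- conversely: if B's run counter reaches k, there is a k-fold repeat (possibly using m ≤ r context chars)
theorem pvClaimB (s : List Char) : ∀ (r : Int) (p : Option Char) (k : Nat), 0 ≤ r → 1 ≤ k →
    (k : Int) ≤ pvG r p s →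
    (∃ b ∈ (['A', 'T', 'G', 'C'] : List Char), List.replicate k b <:+: s) ∨
    (∃ b, p = some b ∧ b ∈ (['A', 'T', 'G', 'C'] : List Char) ∧
      ∃ m : Nat, (m : Int) ≤ r ∧ List.replicate (k - m) b <+: s) := by
  induction s with
  | nil =>
    intro r p k hr hk h
    simp [pvG] at h; omega
  | cons c t ih =>
    intro r p k hr hk h
    by_cases hmC : c ∈ ['A', 'T', 'G', 'C']
    · simp only [pvG, hmC, if_true] at h
      set r' : Int := if some c = p then r + 1 else 1 with hr'
      have hr'0 : 0 ≤ r' := by rw [hr']; split_ifs <;> omega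
      rcases le_max_iff.mp h with h1 | h2
      · by_cases hcp : some c = p
        · right
          refine ⟨c, hcp.symm, hmC, k - 1, ?_, ?_⟩
          · rw [hr', if_pos hcp] at h1; omega
          · have hks : k - (k - 1) = 1 := by omega
            rw [hks]; simp
        · left
          have hk1 : k = 1 := by rw [hr', if_neg hcp] at h1; omega
          subst hk1
          exact ⟨c, hmC, [], t, by simp⟩
      · rcases ih r' (some c) k hr'0 hk h2 with h3 | ⟨b, hb1, hb2, m, hm1, hm2⟩
        · left
          rcases h3 with ⟨b, hb, u, v, huv⟩
          exact ⟨b, hb, c :: u, v, by simp [← huv]⟩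
        · obtain rfl : c = b := Option.some.inj hb1
          rcases Nat.eq_zero_or_pos m with hm0 | hmpos
          · left
            subst hm0
            rcases hm2 with ⟨v, hv⟩
            refine ⟨c, hb2, [c], v, ?_⟩
            simp only [Nat.sub_zero] at hv
            simpa using congrArg (c :: ·) hv
          · by_cases hcp : some c = p
            · right
              refine ⟨c, hcp.symm, hb2, m - 1, ?_, ?_⟩
              · rw [hr', if_pos hcp] at hm1; omega
              · by_cases hkm : m ≤ k
                · have hks : k - (m - 1) = (k - m) + 1 := by omega
                  rw [hks, List.replicate_succ, List.cons_prefix_cons]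
                  exact ⟨rfl, hm2⟩
                · by_cases hkm1 : k ≤ m - 1
                  · simp [Nat.sub_eq_zero_of_le hkm1]
                  · have hks : k - (m - 1) = 1 := by omega
                    rw [hks]; simp
            · left
              have hm1' : m = 1 := by rw [hr', if_neg hcp] at hm1; omega
              subst hm1'
              rcases hm2 with ⟨v, hv⟩
              refine ⟨c, hb2, [], v, ?_⟩
              obtain ⟨k', rfl⟩ : ∃ k', k = k' + 1 := ⟨k - 1, by omega⟩
              simp only [Nat.add_sub_cancel] at hv
              simp only [List.nil_append, List.replicate_succ, List.cons_append, hv]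
    · simp only [pvG, hmC, if_false] at h
      have h2 : (k : Int) ≤ pvG 0 (some c) t := by
        have := pvG_nonneg t 0 (some c); omega
      rcases ih 0 (some c) k le_rfl hk h2 with h3 | ⟨b, hb1, hb2, m, hm1, hm2⟩
      · left
        rcases h3 with ⟨b, hb, u, v, huv⟩
        exact ⟨b, hb, c :: u, v, by simp [← huv]⟩
      · obtain rfl : c = b := Option.some.inj hb1
        exact absurd hb2 hmC

-- mono check of A equals B's best-run threshold test
theorem pvE1 (s : List Char) (k : Int) :
    ((['A', 'T', 'G', 'C'] : List Char).any (fun base =>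
        PySem.Chars.isIn (PySem.List.pyRepeat [base] k) s))
      = decide (k ≤ (s.foldl pvStepB (0, 0, none)).1) := by
  have hbest : (s.foldl pvStepB (0, 0, none)).1 = max 0 (pvG 0 none s) :=
    pvFold_fst s 0 0 none le_rfl
  rw [Bool.eq_iff_iff]
  simp only [List.any_eq_true, decide_eq_true_eq, PySem.List.pyRepeat_singleton,
    PySem.Chars.isIn_iff_infix, hbest]
  constructor
  · rintro ⟨b, hb, hinf⟩
    by_cases hk : k ≤ 0
    · exact le_max_iff.mpr (Or.inl hk)
    · have hk1 : 1 ≤ k.toNat := by omega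
      have := pvClaimA s b hb k.toNat hk1 hinf
      exact le_max_iff.mpr (Or.inr (by omega))
  · intro hle
    by_cases hk : k ≤ 0
    · exact ⟨'A', by simp, by simp [Int.toNat_of_nonpos hk]⟩
    · have hk1 : 1 ≤ k.toNat := by omega
      have hG : ((k.toNat : Nat) : Int) ≤ pvG 0 none s := by
        rcases le_max_iff.mp hle with h | h <;> omega
      rcases pvClaimB s 0 none k.toNat le_rfl hk1 hG with ⟨b, hb, hinf⟩ | ⟨b, hb1, _⟩
      · exact ⟨b, hb, hinf⟩
      · exact absurd hb1 (by simp)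

theorem pvTake2 (s : List Char) (j : Nat) (h : j + 1 < s.length) :
    (s.drop j).take 2 = [s[j]'(by omega), s[j + 1]'(by omega)] := by
  apply List.ext_getElem
  · simp; omega
  · intro i h1 h2
    simp only [List.length_take, List.length_drop] at h1
    have hi : i < 2 := by omega
    simp only [List.getElem_take, List.getElem_drop]
    interval_cases i <;> simp

theorem pvTake6 (s : List Char) (j : Nat) (h : j + 5 < s.length) :
    (s.drop j).take 6 = [s[j]'(by omega), s[j + 1]'(by omega), s[j + 2]'(by omega),
      s[j + 3]'(by omega), s[j + 4]'(by omega), s[j + 5]'(by omega)] := by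
  apply List.ext_getElem
  · simp; omega
  · intro i h1 h2
    simp only [List.length_take, List.length_drop] at h1
    have hi : i < 6 := by omega
    simp only [List.getElem_take, List.getElem_drop]
    interval_cases i <;> simp

theorem pvInfixWindow (s : List Char) (j : Nat) (w : List Char)
    (hw : (s.drop j).take 6 = w) : w <:+: s :=
  ⟨s.take j, (s.drop j).drop 6, by
    rw [← hw, List.append_assoc, List.take_append_drop, List.take_append_drop]⟩

-- A's dinucleotide scan equals B's period-2 window scan
theorem pvE2 (s : List Char) :
    ((PySem.List.pyRange 0 ((s.length : Int) - 5) 1).any (fun i =>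
        PySem.Chars.isIn (PySem.List.pyRepeat (PySem.List.slice s (some i) (some (i + 2))) 3) s))
      = ((List.range (s.length - 5)).any (fun j =>
        (s.getD j ' ' == s.getD (j + 2) ' ' && s.getD (j + 2) ' ' == s.getD (j + 4) ' ') &&
        (s.getD (j + 1) ' ' == s.getD (j + 3) ' ' && s.getD (j + 3) ' ' == s.getD (j + 5) ' '))) := by
  rw [Bool.eq_iff_iff]
  simp only [List.any_eq_true, List.mem_range]
  constructor
  · rintro ⟨i, hi, hin⟩
    rw [PySem.List.mem_pyRange_iff_of_pos one_pos] at hi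
    obtain ⟨hi0, hi5, -⟩ := hi
    rw [PySem.Chars.isIn_iff_infix] at hin
    have hsl : PySem.List.slice s (some i) (some (i + 2)) = (s.drop i.toNat).take 2 := by
      rw [PySem.List.slice_toNat s hi0 (by omega)]
      congr 1
      omega
    have hlen2 : ((s.drop i.toNat).take 2).length = 2 := by
      simp only [List.length_take, List.length_drop]
      omega
    rw [hsl] at hin
    obtain ⟨a, b, hd2⟩ := List.length_eq_two.mp hlen2
    rw [hd2] at hin
    have hrep : PySem.List.pyRepeat [a, b] 3 = [a, b, a, b, a, b] := by
      simp [PySem.List.pyRepeat, List.replicate_succ]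
    rw [hrep] at hin
    rcases hin with ⟨u, v, huv⟩
    subst huv
    refine ⟨u.length, ?_, ?_⟩
    · simp
      omega
    · rw [List.getD_eq_getElem _ ' ' (show u.length < (u ++ [a, b, a, b, a, b] ++ v).length by simp),
        List.getD_eq_getElem _ ' ' (show u.length + 1 < (u ++ [a, b, a, b, a, b] ++ v).length by simp),
        List.getD_eq_getElem _ ' ' (show u.length + 2 < (u ++ [a, b, a, b, a, b] ++ v).length by simp),
        List.getD_eq_getElem _ ' ' (show u.length + 3 < (u ++ [a, b, a, b, a, b] ++ v).length by simp),
        List.getD_eq_getElem _ ' ' (show u.length + 4 < (u ++ [a, b, a, b, a, b] ++ v).length by simp),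
        List.getD_eq_getElem _ ' ' (show u.length + 5 < (u ++ [a, b, a, b, a, b] ++ v).length by simp)]
      simp
  · rintro ⟨j, hj, hcond⟩
    have hjl : j + 5 < s.length := by omega
    rw [List.getD_eq_getElem s ' ' (show j < s.length by omega),
      List.getD_eq_getElem s ' ' (show j + 1 < s.length by omega),
      List.getD_eq_getElem s ' ' (show j + 2 < s.length by omega),
      List.getD_eq_getElem s ' ' (show j + 3 < s.length by omega),
      List.getD_eq_getElem s ' ' (show j + 4 < s.length by omega),
      List.getD_eq_getElem s ' ' (show j + 5 < s.length by omega)] at hcond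
    simp only [Bool.and_eq_true, beq_iff_eq] at hcond
    obtain ⟨⟨h02, h24⟩, h13, h35⟩ := hcond
    refine ⟨(j : Int), ?_, ?_⟩
    · rw [PySem.List.mem_pyRange_iff_of_pos one_pos]
      refine ⟨by omega, by omega, by simp⟩
    · rw [PySem.Chars.isIn_iff_infix]
      have hsl : PySem.List.slice s (some (j : Int)) (some ((j : Int) + 2)) = (s.drop j).take 2 := by
        rw [PySem.List.slice_toNat s (by omega) (by omega)]
        congr 1 <;> omega
      rw [hsl, pvTake2 s j (by omega)]
      have hrep : PySem.List.pyRepeat [s[j]'(by omega), s[j + 1]'(by omega)] 3 =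
          [s[j]'(by omega), s[j + 1]'(by omega), s[j]'(by omega), s[j + 1]'(by omega),
           s[j]'(by omega), s[j + 1]'(by omega)] := by
        simp [PySem.List.pyRepeat, List.replicate_succ]
      rw [hrep]
      refine pvInfixWindow s j _ ?_
      rw [pvTake6 s j hjl, ← h24, ← h35, ← h02, ← h13]

theorem pvMain (s : List Char) (k : Int) :
    (if (['A', 'T', 'G', 'C'] : List Char).any (fun base =>
        PySem.Chars.isIn (PySem.List.pyRepeat [base] k) s) then
      true
    else
      (PySem.List.pyRange 0 ((s.length : Int) - 5) 1).any (fun i =>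
        PySem.Chars.isIn (PySem.List.pyRepeat (PySem.List.slice s (some i) (some (i + 2))) 3) s))
    = (if (s.foldl pvStepB (0, 0, none)).1 ≥ k then
      true
    else
      (List.range (s.length - 5)).any (fun j =>
        (s.getD j ' ' == s.getD (j + 2) ' ' && s.getD (j + 2) ' ' == s.getD (j + 4) ' ') &&
        (s.getD (j + 1) ' ' == s.getD (j + 3) ' ' && s.getD (j + 3) ' ' == s.getD (j + 5) ' '))) := by
  rw [pvE1 s k, pvE2 s]
  by_cases h : k ≤ (s.foldl pvStepB (0, 0, none)).1 <;> simp [h, ge_iff_le]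

-- ===== VERDICT (by name: the statement is the Claim_ definition above) =====
theorem check_repeat_region_spec : Claim_equal_check_repeat_region := by
  intro seq k _
  exact pvMain (PySem.Chars.upper seq.toList) k
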